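-- pv_equiv track=rewrite | github.com/coolman-success/CodeSignalPractice | Arcade/The Core/4 - Loop Tunnel/28 - Lineup.py | solution
-- ===== SOURCE A (Python) =====
-- def solution(commands):
--
--     count = 0
--     same = True
--     for command in commands:
--         if command in ["L", "R"]:
--             same = not same
--         if same:
--             count += 1
--
--     return count
-- ===== SOURCE B (Python) =====
-- def solution(commands):
--     # Two-pass decomposition: build running turn totals, then count even ones.
--     total = 0
--     prefix = []
--     for c in commands:
--         total += c in ("L", "R")
--         prefix.append(total)
--     return sum(t % 2 == 0 for t in prefix)
-- ===== Notes on version B (the rewrite author's own statement) =====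
-- stated objective: alternative
-- what changed: Replaces the fused toggle-and-count loop (boolean state flipped in place) with a two-pass decomposition: first build the running count of L/R turns at every position, then separately count how many running totals are even.
import Mathlib
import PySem

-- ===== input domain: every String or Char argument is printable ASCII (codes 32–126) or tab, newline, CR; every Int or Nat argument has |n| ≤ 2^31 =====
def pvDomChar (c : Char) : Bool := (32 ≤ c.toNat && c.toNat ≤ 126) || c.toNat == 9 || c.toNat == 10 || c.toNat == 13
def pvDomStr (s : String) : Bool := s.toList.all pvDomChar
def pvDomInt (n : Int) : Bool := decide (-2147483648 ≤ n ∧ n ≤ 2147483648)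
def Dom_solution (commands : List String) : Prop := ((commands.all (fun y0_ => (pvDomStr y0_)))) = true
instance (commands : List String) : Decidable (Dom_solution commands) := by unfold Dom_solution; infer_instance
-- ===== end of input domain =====

-- ===== PORT A =====
-- Port of A: one fused loop over (count, same), toggling same on "L"/"R".
def solution (commands : List String) : Int :=
  (commands.foldl (fun (st : Int × Bool) (command : String) =>
      let st' := if command = "L" ∨ command = "R" then (st.1, !st.2) else st
      if st'.2 then (st'.1 + 1, st'.2) else st') ((0 : Int), true)).1

-- ===== PORT B =====
-- Port of B: build the list of running turn totals, then count the even ones.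
def solution_alt (commands : List String) : Int :=
  let p := commands.foldl (fun (st : Int × List Int) (c : String) =>
      let total := st.1 + (if c = "L" ∨ c = "R" then (1 : Int) else 0)
      (total, st.2 ++ [total])) ((0 : Int), ([] : List Int))
  ((p.2.filter (fun t => t % 2 == 0)).length : Int)

-- ===== PRECONDITION & SPEC =====
def Spec_solution (commands : List String) (out : Int) : Prop := out = solution_alt commands
instance (commands : List String) (out : Int) : Decidable (Spec_solution commands out) := by unfold Spec_solution; infer_instance

-- ===== CLAIM (what is proved, stated in full; the proofs are below) =====
def Claim_equal_solution : Prop := ∀ (commands : List String), Dom_solution commands → Spec_solution commands (solution commands)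

-- ===== LEMMAS AND PROOFS =====

def stepA : Int × Bool → String → Int × Bool := fun st command =>
  let st' := if command = "L" ∨ command = "R" then (st.1, !st.2) else st
  if st'.2 then (st'.1 + 1, st'.2) else st'

def stepB : Int × List Int → String → Int × List Int := fun st c =>
  let total := st.1 + (if c = "L" ∨ c = "R" then (1 : Int) else 0)
  (total, st.2 ++ [total])

def evens (l : List Int) : Int := ((l.filter (fun t => t % 2 == 0)).length : Int)

lemma foldB_snd (l : List String) (t : Int) (acc : List Int) :
    (l.foldl stepB (t, acc)).2 = acc ++ (l.foldl stepB (t, [])).2 := by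
  induction l generalizing t acc with
  | nil => simp
  | cons c l ih =>
    simp only [List.foldl_cons, stepB, List.nil_append]
    rw [ih, ih (t + _) [_], List.append_assoc]

lemma evens_append (a b : List Int) : evens (a ++ b) = evens a + evens b := by
  simp [evens, List.filter_append]

lemma key (l : List String) (c t : Int) :
    (l.foldl stepA (c, decide (t % 2 = 0))).1 = c + evens (l.foldl stepB (t, [])).2 := by
  induction l generalizing c t with
  | nil => simp [evens]
  | cons s l ih =>
    simp only [List.foldl_cons, stepA, stepB, List.nil_append]
    rw [foldB_snd l _ [_], evens_append]
    by_cases hs : s = "L" ∨ s = "R"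
    · have hb : (!decide (t % 2 = 0)) = decide ((t + 1) % 2 = 0) := by
        rcases Int.emod_two_eq_zero_or_one t with h | h <;>
          simp [h] <;> omega
      by_cases he : (t + 1) % 2 = 0
      · simp only [if_pos hs, hb, he, decide_true, if_pos]
        have := ih (c + 1) (t + 1)
        simp only [he, decide_true] at this
        simp [this, evens, he]; ring
      · simp only [if_pos hs, hb, he, decide_false, if_neg, Bool.false_eq_true,
          not_false_eq_true]
        have := ih c (t + 1)
        simp only [he, decide_false] at this
        simp [this, evens, he]
    · by_cases he : t % 2 = 0
      · simp only [if_neg hs, he, decide_true, if_pos]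
        have := ih (c + 1) t
        simp only [he, decide_true] at this
        simp [this, evens, he]; ring
      · simp only [if_neg hs, he, decide_false, Bool.false_eq_true, if_neg,
          not_false_eq_true]
        have := ih c t
        simp only [he, decide_false] at this
        rw [this]
        simp [evens, he]

-- ===== VERDICT (by name: the statement is the Claim_ definition above) =====
theorem solution_spec : Claim_equal_solution := by
  intro commands _
  show solution commands = solution_alt commands
  have h := key commands 0 0
  simpa [solution, solution_alt, stepA, stepB, evens] using h
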